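-- pv_equiv track=rewrite | github.com/ranjandevi219/AI | LAB-8 (Forward Chaining).py | unify_condition_with_fact
-- ===== SOURCE A (Python) =====
-- def unify_condition_with_fact(condition, fact):
--     predicate_condition, args_condition = condition.split("(")
--     predicate_fact, args_fact = fact.split("(")
--
--     if predicate_condition != predicate_fact:
--         return None  # Predicates must match
--
--     args_condition = args_condition[:-1].split(",")
--     args_fact = args_fact[:-1].split(",")
--
--     if len(args_condition) != len(args_fact):
--         return None
--
--     substitutions = {}
--
--     for var, constant in zip(args_condition, args_fact):
--         if var.islower():  # If it's a variable, substitute it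
--             substitutions[var] = constant
--         elif var != constant:  # If constants don't match, return None
--             return None
--
--     return substitutions
-- ===== SOURCE B (Python) =====
-- def _unify_args(xs, ys):
--     # Recursive unification of the two argument lists: arity mismatch surfaces
--     # as one list emptying before the other; the substitution is built
--     # back-to-front, the head binding merged under the recursive result.
--     if not xs and not ys:
--         return {}
--     if not xs or not ys:
--         return None
--     v, c = xs[0], ys[0]
--     if not v.islower() and v != c:
--         return None
--     rest = _unify_args(xs[1:], ys[1:])
--     if rest is None:
--         return None
--     return {v: c, **rest} if v.islower() else rest
--
--
-- def unify_condition_with_fact(condition, fact):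
--     predicate_condition, args_condition = condition.split("(")
--     predicate_fact, args_fact = fact.split("(")
--
--     if predicate_condition != predicate_fact:
--         return None
--
--     return _unify_args(args_condition[:-1].split(","), args_fact[:-1].split(","))
-- ===== Notes on version B (the rewrite author's own statement) =====
-- stated objective: alternative
-- what changed: A's iterative zip loop with an explicit arity check and a mutating substitution dict is replaced by a structural recursion on the two argument lists: arity mismatch falls out of the recursion (no zip, no length check), and the substitution is assembled back-to-front by merging the head binding under the recursive result ({v: c, **rest}).
import Mathlib
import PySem

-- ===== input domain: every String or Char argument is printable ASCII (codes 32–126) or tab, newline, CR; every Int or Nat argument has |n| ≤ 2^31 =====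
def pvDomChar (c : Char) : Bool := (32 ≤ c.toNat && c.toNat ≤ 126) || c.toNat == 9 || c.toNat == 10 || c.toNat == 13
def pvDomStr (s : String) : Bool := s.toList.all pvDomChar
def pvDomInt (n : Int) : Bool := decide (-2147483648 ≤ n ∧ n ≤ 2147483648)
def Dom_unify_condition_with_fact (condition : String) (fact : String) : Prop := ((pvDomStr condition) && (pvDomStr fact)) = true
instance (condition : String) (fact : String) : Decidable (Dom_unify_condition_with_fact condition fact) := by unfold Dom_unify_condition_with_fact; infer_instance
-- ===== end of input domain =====

-- B replaces A's iterative zip loop (explicit arity check, mutating dict) by a structural recursion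
-- on the two argument lists that builds the substitution back-to-front ({v: c, **rest});
-- objective: alternative decomposition, same cost.

-- str.islower() ported by hand (PySem has only the per-char predicates): on the ASCII domain the
-- cased characters are exactly the letters, so s.islower() = (some char is a lowercase letter) and
-- (no char is an uppercase letter) — exact on the stated ASCII domain.
def pyStrIslower (s : String) : Bool :=
  s.toList.any PySem.Chars.islower && s.toList.all (fun c => !PySem.Chars.isupper c)

-- ===== PORT A =====
-- the for-loop over zip(args_condition, args_fact) with the mutable dict and early `return None`
def unifyLoopA : List (String × String) → PySem.Dict String String → Option (PySem.Dict String String)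
  | [], subs => some subs
  | (var, constant) :: rest, subs =>
    if pyStrIslower var then unifyLoopA rest (subs.insert var constant)
    else if var ≠ constant then none
    else unifyLoopA rest subs

def unify_condition_with_fact (condition : String) (fact : String) : Option (List (String × String)) :=
  match PySem.Str.split? condition "(", PySem.Str.split? fact "(" with
  | some [predicate_condition, args_condition], some [predicate_fact, args_fact] =>
    if predicate_condition ≠ predicate_fact then none
    else
      let args_condition' := (PySem.Str.split? (PySem.Str.slice args_condition none (some (-1))) ",").getD []
      let args_fact' := (PySem.Str.split? (PySem.Str.slice args_fact none (some (-1))) ",").getD []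
      if args_condition'.length ≠ args_fact'.length then none
      else (unifyLoopA (args_condition'.zip args_fact') PySem.Dict.empty).map (·.items)
  | _, _ => none  -- unreachable under Pre_ (Python raises a ValueError on unpacking)

-- ===== PORT B =====
-- _unify_args: recursion on the two lists; `{v: c, **rest}` is `(empty.insert v c).update rest.items`
def unifyArgsB : List String → List String → Option (PySem.Dict String String)
  | [], [] => some PySem.Dict.empty
  | [], _ :: _ => none
  | _ :: _, [] => none
  | v :: xs, c :: ys =>
    if !pyStrIslower v && !(v == c) then none
    else
      match unifyArgsB xs ys with
      | none => none
      | some rest =>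
        if pyStrIslower v then some ((PySem.Dict.empty.insert v c).update rest.items)
        else some rest

def unify_condition_with_fact_alt (condition : String) (fact : String) : Option (List (String × String)) :=
  let cps := (PySem.Str.split? condition "(").getD []
  let fps := (PySem.Str.split? fact "(").getD []
  -- the 2-element unpack `pc, ac = condition.split("(")`; any other shape raises in Python (outside Pre_)
  if cps.length = 2 ∧ fps.length = 2 then
    let predicate_condition := (cps[0]?).getD ""
    let args_condition := (cps[1]?).getD ""
    let predicate_fact := (fps[0]?).getD ""
    let args_fact := (fps[1]?).getD ""
    if predicate_condition ≠ predicate_fact then none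
    else
      let xs := (PySem.Str.split? (PySem.Str.slice args_condition none (some (-1))) ",").getD []
      let ys := (PySem.Str.split? (PySem.Str.slice args_fact none (some (-1))) ",").getD []
      (unifyArgsB xs ys).map (·.items)
  else none

-- ===== PRECONDITION & SPEC =====
-- Pre_ excludes exactly the inputs where Python A raises a ValueError while unpacking:
-- a string with zero or more than one '(' makes `x, y = s.split("(")` raise.
def Pre_unify_condition_with_fact (condition : String) (fact : String) : Prop :=
  PySem.Str.count condition "(" = 1 ∧ PySem.Str.count fact "(" = 1

instance (condition : String) (fact : String) : Decidable (Pre_unify_condition_with_fact condition fact) := by unfold Pre_unify_condition_with_fact; infer_instance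

def pvWitness_unify_condition_with_fact : String × String := ("Likes(x,Apple)", "Likes(John,Apple)")

def Spec_unify_condition_with_fact (condition : String) (fact : String) (out : Option (List (String × String))) : Prop := out = unify_condition_with_fact_alt condition fact
instance (condition : String) (fact : String) (out : Option (List (String × String))) : Decidable (Spec_unify_condition_with_fact condition fact out) := by unfold Spec_unify_condition_with_fact; infer_instance

-- ===== CLAIM (what is proved, stated in full; the proofs are below) =====
def Claim_equal_unify_condition_with_fact : Prop := ∀ (condition : String) (fact : String), Dom_unify_condition_with_fact condition fact → Pre_unify_condition_with_fact condition fact → Spec_unify_condition_with_fact condition fact (unify_condition_with_fact condition fact)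

-- ===== LEMMAS AND PROOFS =====

-- Two inserts at distinct keys commute when the first key is already present.
theorem insert_comm_of_contains {ν : Type} (d : PySem.Dict String ν) (k k1 : String) (w v1 : ν)
    (hc : d.contains k = true) (hne : k1 ≠ k) :
    (d.insert k w).insert k1 v1 = (d.insert k1 v1).insert k w := by
  apply PySem.Dict.ext
  have hck1 : (d.insert k w).contains k1 = d.contains k1 := by
    rw [PySem.Dict.contains_insert]; simp [hne]
  have hck : (d.insert k1 v1).contains k = true := by
    rw [PySem.Dict.contains_insert]; simp [hc]
  cases hc1 : d.contains k1 with
  | true =>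
    rw [PySem.Dict.items_insert_of_contains _ _ (by rw [hck1]; exact hc1),
        PySem.Dict.items_insert_of_contains _ _ hc,
        PySem.Dict.items_insert_of_contains _ _ hck,
        PySem.Dict.items_insert_of_contains _ _ hc1,
        List.map_map, List.map_map]
    apply List.map_congr_left
    intro p _
    simp only [Function.comp]
    by_cases hpk : p.1 = k
    · simp [hpk, Ne.symm hne]
    · by_cases hpk1 : p.1 = k1 <;> simp [hpk, hpk1, hne]
  | false =>
    rw [PySem.Dict.items_insert_of_not_contains _ _ (by rw [hck1]; exact hc1),
        PySem.Dict.items_insert_of_contains _ _ hc,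
        PySem.Dict.items_insert_of_contains _ _ hck,
        PySem.Dict.items_insert_of_not_contains _ _ hc1,
        List.map_append]
    simp [hne]

-- Folding inserts whose keys all differ from k past an insert of k (already present) commutes.
theorem foldl_insert_past {ν : Type} (A : List (String × ν)) (k : String) (w : ν) :
    ∀ (d : PySem.Dict String ν), d.contains k = true → (∀ p ∈ A, p.1 ≠ k) →
    A.foldl (fun d p => d.insert p.1 p.2) (d.insert k w) =
      (A.foldl (fun d p => d.insert p.1 p.2) d).insert k w := by
  induction A with
  | nil => intro d _ _; rfl
  | cons a A ih =>
    intro d hc hA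
    simp only [List.foldl_cons]
    rw [insert_comm_of_contains d k a.1 w a.2 hc (hA a (by simp)),
        ih (d.insert a.1 a.2) (by rw [PySem.Dict.contains_insert]; simp [hc])
           (fun p hp => hA p (by simp [hp]))]

-- Folding a key-replaced association list equals folding the original then inserting the new pair.
theorem foldl_insert_map_replace {ν : Type} (A : List (String × ν)) (k : String) (w : ν) :
    ∀ (d : PySem.Dict String ν), (A.map (·.1)).Nodup → k ∈ A.map (·.1) →
    (A.map (fun p => if p.1 == k then (k, w) else p)).foldl (fun d p => d.insert p.1 p.2) d =
      (A.foldl (fun d p => d.insert p.1 p.2) d).insert k w := by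
  induction A with
  | nil => intro d _ hk; simp at hk
  | cons a A ih =>
    intro d hnd hk
    simp only [List.map_cons, List.nodup_cons, List.mem_cons] at hnd hk
    by_cases hak : a.1 = k
    · subst hak
      have hArest : ∀ p ∈ A, p.1 ≠ a.1 := by
        intro p hp hpk
        exact hnd.1 (hpk ▸ List.mem_map_of_mem hp)
      have hmapA : A.map (fun p => if p.1 == a.1 then (a.1, w) else p) = A := by
        rw [List.map_congr_left (g := id) (fun p hp => by simp [hArest p hp]), List.map_id]
      simp only [List.map_cons, List.foldl_cons, beq_self_eq_true, if_true, hmapA]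
      rw [← PySem.Dict.insert_insert_self d a.1 a.2 w,
          foldl_insert_past A a.1 w (d.insert a.1 a.2)
            (PySem.Dict.contains_insert_self d a.1 a.2) hArest]
    · have hkA : k ∈ A.map (·.1) := by
        rcases hk with h | h
        · exact absurd h.symm hak
        · exact h
      have hbk : (a.1 == k) = false := by simp [hak]
      simp only [List.map_cons, List.foldl_cons, hbk, Bool.false_eq_true, if_false]
      exact ih (d.insert a.1 a.2) hnd.2 hkA

-- Folding the items of (x.insert k w) equals folding x's items then inserting (k, w).
theorem foldl_items_insert {ν : Type} (x : PySem.Dict String ν) (k : String) (w : ν)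
    (e : PySem.Dict String ν) (hnd : x.keys.Nodup) :
    (x.insert k w).items.foldl (fun d p => d.insert p.1 p.2) e =
      (x.items.foldl (fun d p => d.insert p.1 p.2) e).insert k w := by
  cases hc : x.contains k with
  | true =>
    rw [PySem.Dict.items_insert_of_contains _ _ hc]
    exact foldl_insert_map_replace x.items k w e
      (by simpa only [PySem.Dict.keys] using hnd)
      (by
        have := (PySem.Dict.contains_iff_mem_keys x k).mp hc
        simpa only [PySem.Dict.keys] using this)
  | false =>
    rw [PySem.Dict.items_insert_of_not_contains _ _ hc, List.foldl_append]
    rfl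

-- Replaying a dict built by a fold of inserts on top of e equals folding the raw pairs on e.
theorem foldl_items_foldl {ν : Type} (L : List (String × ν)) :
    ∀ (x e : PySem.Dict String ν), x.keys.Nodup →
    (L.foldl (fun d p => d.insert p.1 p.2) x).items.foldl (fun d p => d.insert p.1 p.2) e =
      L.foldl (fun d p => d.insert p.1 p.2) (x.items.foldl (fun d p => d.insert p.1 p.2) e) := by
  induction L with
  | nil => intro x e _; rfl
  | cons a L ih =>
    intro x e hnd
    simp only [List.foldl_cons]
    rw [ih (x.insert a.1 a.2) e (PySem.Dict.nodup_keys_insert x a.1 a.2 hnd),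
        foldl_items_insert x a.1 a.2 e hnd]

-- A's interleaved loop equals the validate-then-accumulate characterisation, for any starting dict.
theorem unifyLoopA_eq (pairs : List (String × String)) (d : PySem.Dict String String) :
    unifyLoopA pairs d =
      if pairs.all (fun p => pyStrIslower p.1 || p.1 == p.2) then
        some ((pairs.filter (fun p => pyStrIslower p.1)).foldl
                (fun d p => d.insert p.1 p.2) d)
      else none := by
  induction pairs generalizing d with
  | nil => simp [unifyLoopA]
  | cons hd tl ih =>
    obtain ⟨v, c⟩ := hd
    simp only [unifyLoopA, List.all_cons, List.filter_cons]
    by_cases hv : pyStrIslower v = true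
    · rw [if_pos hv, ih, hv]
      simp only [Bool.true_or, Bool.true_and, if_true, List.foldl_cons]
    · replace hv : pyStrIslower v = false := by simpa using hv
      rw [if_neg (by simp [hv]), hv]
      by_cases hc : v = c
      · subst hc; rw [if_neg (by simp), ih]
        simp only [Bool.false_or, BEq.rfl, Bool.true_and, Bool.false_eq_true, if_false]
      · rw [if_pos hc]
        have hbc : (v == c) = false := by simp [hc]
        simp [hbc]

-- B's recursion returns none on arity mismatch.
theorem unifyArgsB_none_of_length_ne (xs : List String) :
    ∀ ys : List String, xs.length ≠ ys.length → unifyArgsB xs ys = none := by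
  induction xs with
  | nil =>
    intro ys h
    cases ys with
    | nil => simp at h
    | cons c ys => rfl
  | cons v xs ih =>
    intro ys h
    cases ys with
    | nil => rfl
    | cons c ys =>
      have htl : xs.length ≠ ys.length := by simpa using h
      simp only [unifyArgsB, ih ys htl]
      split <;> rfl

-- B's recursion equals the same characterisation as A's loop (equal lengths).
theorem unifyArgsB_eq (xs : List String) :
    ∀ ys : List String, xs.length = ys.length →
    unifyArgsB xs ys =
      if (xs.zip ys).all (fun p => pyStrIslower p.1 || p.1 == p.2) then
        some (((xs.zip ys).filter (fun p => pyStrIslower p.1)).foldl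
                (fun d p => d.insert p.1 p.2) PySem.Dict.empty)
      else none := by
  induction xs with
  | nil =>
    intro ys h
    cases ys with
    | nil => simp [unifyArgsB]
    | cons c ys => simp at h
  | cons v xs ih =>
    intro ys h
    cases ys with
    | nil => simp at h
    | cons c ys =>
      have htl : xs.length = ys.length := by simpa using h
      simp only [unifyArgsB, List.zip_cons_cons, List.all_cons, List.filter_cons]
      by_cases hv : pyStrIslower v = true
      · rw [ih ys htl]
        simp only [hv, Bool.not_true, Bool.false_and, Bool.false_eq_true, if_false,
          Bool.true_or, Bool.true_and, if_true]
        by_cases hall : ((xs.zip ys).all fun p => pyStrIslower p.1 || p.1 == p.2) = true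
        · rw [if_pos hall, if_pos hall]
          simp only [List.foldl_cons]
          show some (PySem.Dict.update _ _) = _
          unfold PySem.Dict.update
          rw [foldl_items_foldl _ PySem.Dict.empty (PySem.Dict.empty.insert v c)
                (PySem.Dict.nodup_keys_empty)]
          rfl
        · replace hall : ((xs.zip ys).all fun p => pyStrIslower p.1 || p.1 == p.2) = false := by
            simpa using hall
          simp [hall]
      · replace hv : pyStrIslower v = false := by simpa using hv
        rw [hv]
        simp only [Bool.not_false, Bool.true_and, Bool.false_or, Bool.false_eq_true, if_false]
        by_cases hc : v = c
        · subst hc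
          simp only [BEq.rfl, Bool.not_true, Bool.false_eq_true, if_false, Bool.true_and]
          rw [ih ys htl]
          by_cases hall : ((xs.zip ys).all fun p => pyStrIslower p.1 || p.1 == p.2) = true
          · simp [hall]
          · simp [(by simpa using hall : ((xs.zip ys).all fun p => pyStrIslower p.1 || p.1 == p.2) = false)]
        · have hbc : (v == c) = false := by simp [hc]
          simp [hbc]

theorem unify_condition_with_fact_spec : Claim_equal_unify_condition_with_fact := by
  intro condition fact _ _
  unfold Spec_unify_condition_with_fact unify_condition_with_fact unify_condition_with_fact_alt
  cases hps : PySem.Str.split? condition "(" with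
  | none => rfl
  | some ps =>
    match ps with
    | [] => rfl
    | [_] => rfl
    | _ :: _ :: _ :: t => rfl
    | [p, a] =>
      cases hqs : PySem.Str.split? fact "(" with
      | none => rfl
      | some qs =>
        match qs with
        | [] => rfl
        | [_] => rfl
        | _ :: _ :: _ :: t => rfl
        | [q, b] =>
          simp only [Option.getD_some]
          rw [if_pos (⟨rfl, rfl⟩ : ([p, a].length = 2 ∧ [q, b].length = 2))]
          simp only [List.getElem?_cons_zero, List.getElem?_cons_succ, Option.getD_some]
          split_ifs with h1 h2
          · rfl
          · rw [unifyArgsB_none_of_length_ne _ _ h2]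
            rfl
          · rw [unifyLoopA_eq,
                unifyArgsB_eq _ _ (by omega)]
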